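-- pv_equiv track=rewrite | github.com/Tribushkov/yandex-tasks | validate.py | check_quotes
-- ===== SOURCE A (Python) =====
-- SPECIAL_SYMBOLS = '!,:'
--
-- def check_quotes(user):
--     quote_count = user.count('"')
--     if quote_count > 0:
--         if quote_count % 2 == 0:
--             unquoted = user.split('"')[::2]  # even (unquoted chunks)
--             for chunk in unquoted:
--                 if any(symbol in chunk for symbol in SPECIAL_SYMBOLS):
--                     return False
--         else:
--             return False
--     else:
--         if any(symbol in user for symbol in SPECIAL_SYMBOLS):
--             return False
--     return True
-- ===== SOURCE B (Python) =====
-- SPECIAL_SYMBOLS = '!,:'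
--
-- def check_quotes(user):
--     inside = False
--     for ch in user:
--         if ch == '"':
--             inside = not inside
--         elif not inside and ch in SPECIAL_SYMBOLS:
--             return False
--     return not inside
-- ===== Notes on version B (the rewrite author's own statement) =====
-- stated objective: simpler
-- what changed: Replaced A's count-the-quotes / split-on-quote / scan-even-chunks pipeline with a single left-to-right character pass that carries an inside-quotes boolean, rejecting a special symbol seen outside quotes and a dangling quote at the end.
import Mathlib
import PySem

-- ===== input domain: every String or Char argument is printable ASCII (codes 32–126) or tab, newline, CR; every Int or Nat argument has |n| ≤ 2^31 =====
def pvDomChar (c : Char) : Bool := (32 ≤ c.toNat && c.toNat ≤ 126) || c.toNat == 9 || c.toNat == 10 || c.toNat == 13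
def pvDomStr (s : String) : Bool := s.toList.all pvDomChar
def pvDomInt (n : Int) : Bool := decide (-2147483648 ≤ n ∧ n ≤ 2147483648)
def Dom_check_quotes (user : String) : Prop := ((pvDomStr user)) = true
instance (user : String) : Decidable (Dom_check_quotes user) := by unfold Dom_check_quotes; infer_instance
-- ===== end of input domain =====

-- B replaces A's count/split/chunk-scan pipeline by a single character pass carrying an `inside`-quotes flag (objective: simpler).

-- ===== PORT A =====
-- any(symbol in chunk for symbol in SPECIAL_SYMBOLS), SPECIAL_SYMBOLS = '!,:'
def aAny (chunk : String) : Bool :=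
  "!,:".toList.any (fun symbol => PySem.Str.isIn (String.ofList [symbol]) chunk)

-- 'for chunk in unquoted: if any(...): return False' followed by the shared 'return True'
def aLoop : List String → Bool
  | [] => true
  | chunk :: rest => if aAny chunk then false else aLoop rest

def check_quotes (user : String) : Bool :=
  let quote_count := PySem.Str.count user "\""
  if quote_count > 0 then
    if quote_count % 2 == 0 then
      -- user.split('"')[::2]; the separator is nonempty and the step nonzero, so both options are `some`
      let unquoted := (PySem.List.slice? ((PySem.Str.split? user "\"").getD []) none none 2).getD []
      aLoop unquoted
    else false
  else
    if aAny user then false else true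

-- ===== PORT B =====
-- single pass: toggle `inside` on '"', reject a special symbol seen outside quotes, reject a dangling open quote at the end
def bGo : List Char → Bool → Bool
  | [], inside => !inside
  | ch :: rest, inside =>
    if ch = '"' then bGo rest (!inside)
    else if !inside && PySem.Chars.isIn [ch] "!,:".toList then false
    else bGo rest inside

def check_quotes_alt (user : String) : Bool := bGo user.toList false

-- ===== PRECONDITION & SPEC =====
def Spec_check_quotes (user : String) (out : Bool) : Prop := out = check_quotes_alt user
instance (user : String) (out : Bool) : Decidable (Spec_check_quotes user out) := by unfold Spec_check_quotes; infer_instance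

-- ===== CLAIM (what is proved, stated in full; the proofs are below) =====
def Claim_equal_check_quotes : Prop := ∀ (user : String), Dom_check_quotes user → Spec_check_quotes user (check_quotes user)

-- ===== LEMMAS AND PROOFS =====

-- is c one of SPECIAL_SYMBOLS?
def spec (c : Char) : Bool := c == '!' || c == ',' || c == ':'

-- reference structural splitter: mySplit cs = cs.split('"') (always a nonempty list of quote-free chunks)
def mySplit : List Char → List (List Char)
  | [] => [[]]
  | c :: cs =>
    if c = '"' then [] :: mySplit cs
    else
      match mySplit cs with
      | [] => [[c]]
      | h :: t => (c :: h) :: t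

-- eo true l = l[::2], eo false l = l[1::2]
def eo {α : Type} : Bool → List α → List α
  | _, [] => []
  | true, x :: xs => x :: eo false xs
  | false, _ :: xs => eo true xs

-- what bGo computes on the chunk decomposition
def chunkScan : Bool → List (List Char) → Bool
  | inside, [] => !inside
  | inside, ch :: rest =>
    if !inside && ch.any spec then false
    else match rest with
      | [] => !inside
      | _ :: _ => chunkScan (!inside) rest

def consHead (pre : List Char) : List (List Char) → List (List Char)
  | [] => [pre]
  | h :: t => (pre ++ h) :: t

theorem mySplit_ne_nil (cs : List Char) : mySplit cs ≠ [] := by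
  cases cs with
  | nil => simp [mySplit]
  | cons c t =>
    simp only [mySplit]
    split
    · simp
    · split <;> simp

theorem mySplit_no_quote (cs : List Char) (h : cs.count '"' = 0) : mySplit cs = [cs] := by
  induction cs with
  | nil => rfl
  | cons c t ih =>
    rw [List.count_cons] at h
    have hc : ¬ c = '"' := by
      intro hc
      simp [hc] at h
    have ht : t.count '"' = 0 := by
      rcases Nat.eq_zero_of_add_eq_zero_right h with h'
      exact h'
    simp only [mySplit, if_neg hc, ih ht]

theorem length_mySplit (cs : List Char) : (mySplit cs).length = cs.count '"' + 1 := by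
  induction cs with
  | nil => simp [mySplit]
  | cons c t ih =>
    by_cases hc : c = '"'
    · simp [mySplit, hc, ih]
    · simp only [mySplit, if_neg hc]
      cases hm : mySplit t with
      | nil => exact absurd hm (mySplit_ne_nil t)
      | cons mh mt =>
        rw [hm] at ih
        simp only [List.length_cons] at ih ⊢
        have hcb : ¬ c = '"' := hc
        simp [hcb, ih]

theorem isIn_singleton (c : Char) (l : List Char) : PySem.Chars.isIn [c] l = l.contains c := by
  by_cases h : c ∈ l
  · rw [(PySem.Chars.isIn_iff_infix _ _).mpr ((List.singleton_infix_iff c l).mpr h),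
      List.contains_iff_mem.mpr h]
  · rw [(PySem.Chars.isIn_eq_false_iff _ _).mpr (fun hi => h ((List.singleton_infix_iff c l).mp hi))]
    exact (Bool.eq_false_iff.mpr (fun hc => h (List.contains_iff_mem.mp hc))).symm

theorem bGo_isIn (c : Char) : PySem.Chars.isIn [c] ['!', ',', ':'] = spec c := by
  rw [isIn_singleton]
  simp [spec, Bool.or_assoc, ← Bool.beq_eq_decide_eq]

theorem aAny_eq (s : String) : aAny s = s.toList.any spec := by
  unfold aAny
  rw [show "!,:".toList = ['!', ',', ':'] from rfl]
  simp only [List.any_cons, List.any_nil, PySem.Str.isIn_eq, String.toList_ofList, isIn_singleton]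
  simp only [List.contains_eq_any_beq]
  induction s.toList with
  | nil => simp
  | cons x t ih => simp only [List.any_cons, spec, ← ih, Bool.beq_comm]; ac_rfl

theorem aLoop_eq (l : List String) : aLoop l = l.all (fun ch => !aAny ch) := by
  induction l with
  | nil => rfl
  | cons ch rest ih => cases h : aAny ch <;> simp [aLoop, h, ih]

theorem count_go_singleton (c : Char) (l : List Char) : ∀ (fuel acc : Nat), l.length ≤ fuel →
    PySem.Chars.count.go [c] fuel l acc = acc + l.count c := by
  induction l with
  | nil =>
    intro fuel acc h
    cases fuel <;> simp [PySem.Chars.count.go]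
  | cons x t ih =>
    intro fuel acc h
    cases fuel with
    | zero => simp at h
    | succ f =>
      rw [PySem.Chars.count.go]
      by_cases hx : x = c
      · simp [hx, List.isPrefixOf, ih f (acc + 1) (by simpa using h), Nat.add_comm, Nat.add_left_comm]
      · have hcx : ¬ c = x := fun hh => hx hh.symm
        simp [List.isPrefixOf, hx, hcx, ih f acc (by simpa using h)]

theorem count_singleton (c : Char) (l : List Char) : PySem.Chars.count l [c] = l.count c := by
  rw [PySem.Chars.count]
  simp [count_go_singleton c l (l.length) 0 le_rfl]

theorem splitOn_go (l : List Char) : ∀ (fuel : Nat) (cur : List Char) (acc : List (List Char)),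
    l.length ≤ fuel →
    PySem.Chars.splitOn.go ['"'] fuel l cur acc = acc.reverse ++ consHead cur.reverse (mySplit l) := by
  induction l with
  | nil =>
    intro fuel cur acc h
    cases fuel <;> simp [PySem.Chars.splitOn.go, mySplit, consHead]
  | cons c t ih =>
    intro fuel cur acc h
    cases fuel with
    | zero => simp at h
    | succ f =>
      rw [PySem.Chars.splitOn.go]
      by_cases hc : c = '"'
      · rw [if_pos (by simp [List.isPrefixOf, hc])]
        simp only [List.length_singleton, List.drop_one, List.tail_cons]
        rw [ih f [] (cur.reverse :: acc) (by simpa using h)]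
        simp only [mySplit, if_pos hc, List.reverse_cons, List.reverse_nil]
        cases hm : mySplit t with
        | nil => exact absurd hm (mySplit_ne_nil t)
        | cons mh mt => simp [consHead]
      · rw [if_neg (by simp [List.isPrefixOf]; exact fun hh => hc hh.symm)]
        rw [ih f (c :: cur) acc (by simpa using h)]
        simp only [mySplit, if_neg hc, List.reverse_cons]
        cases hm : mySplit t with
        | nil => exact absurd hm (mySplit_ne_nil t)
        | cons mh mt => simp [consHead]

theorem splitOn_eq (l : List Char) : PySem.Chars.splitOn l ['"'] = mySplit l := by
  rw [PySem.Chars.splitOn, splitOn_go l (l.length + 1) [] [] (by omega)]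
  cases hm : mySplit l with
  | nil => exact absurd hm (mySplit_ne_nil l)
  | cons mh mt => simp [consHead]

theorem eo_map {α β : Type} (f : α → β) (b : Bool) (l : List α) : eo b (l.map f) = (eo b l).map f := by
  induction b, l using eo.induct <;> simp [eo, *]

theorem filterMap_range_eo {α : Type} (b : Bool) (l : List α) :
    (List.range ((l.length + if b then 1 else 0) / 2)).filterMap
        (fun k => l[2 * k + (if b then 0 else 1)]?) = eo b l := by
  induction b, l using eo.induct with
  | case1 b => simp [eo]
  | case2 x xs ih =>
    simp only [Bool.false_eq_true, if_false, Nat.add_zero] at ih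
    simp only [if_true, Nat.add_zero, List.length_cons]
    have hr : (xs.length + 1 + 1) / 2 = xs.length / 2 + 1 := by omega
    rw [hr, List.range_succ_eq_map, List.filterMap_cons, List.filterMap_map]
    have h1 : ((fun k => (x :: xs)[2 * k]?) ∘ Nat.succ) = (fun k => xs[2 * k + 1]?) := by
      funext k
      have h2 : 2 * (k + 1) = (2 * k + 1) + 1 := by omega
      simp [Function.comp, h2]
    have hx : (x :: xs)[2 * 0]? = some x := rfl
    rw [h1, hx]
    simp [eo, ih]
  | case3 x xs ih =>
    simp only [if_true, Nat.add_zero] at ih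
    simp only [Bool.false_eq_true, if_false, List.length_cons]
    have h1 : (fun k => (x :: xs)[2 * k + 1]?) = (fun k => xs[2 * k + 0]?) := by
      funext k
      have h2 : 2 * k + 1 = (2 * k + 0) + 1 := by omega
      simp [h2]
    rw [h1]
    simpa [eo] using ih

theorem slice2_eq {α : Type} (xs : List α) : PySem.List.slice? xs none none 2 = some (eo true xs) := by
  rw [PySem.List.slice?]
  simp only [PySem.List.sliceIndices]
  norm_num
  have hc : (if 0 < xs.length then (((xs.length : Int) + 2 - 1) / 2).toNat else 0)
      = (xs.length + 1) / 2 := by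
    split <;> omega
  rw [hc]
  have h1 : (fun k : Nat => xs[(2 * (k : Int)).toNat]?) = (fun k : Nat => xs[2 * k + (if (true : Bool) then 0 else 1)]?) := by
    funext k
    simp only [if_true, Nat.add_zero]
    congr 1
  rw [h1, show (xs.length + 1) / 2 = ((xs.length + if (true : Bool) then 1 else 0) / 2) by simp]
  rw [filterMap_range_eo]

theorem bGo_eq (cs : List Char) : ∀ inside, bGo cs inside = chunkScan inside (mySplit cs) := by
  induction cs with
  | nil => intro inside; simp [bGo, mySplit, chunkScan]
  | cons c t ih =>
    intro inside
    by_cases hc : c = '"'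
    · rw [show bGo (c :: t) inside = bGo t (!inside) from by simp [bGo, hc]]
      rw [ih (!inside)]
      simp only [mySplit, if_pos hc]
      cases hm : mySplit t with
      | nil => exact absurd hm (mySplit_ne_nil t)
      | cons mh mt =>
        cases mt <;> simp [chunkScan]
    · rw [show bGo (c :: t) inside =
          (if !inside && spec c then false else bGo t inside) from by
            simp [bGo, hc, bGo_isIn]]
      rw [ih inside]
      simp only [mySplit, if_neg hc]
      cases hm : mySplit t with
      | nil => exact absurd hm (mySplit_ne_nil t)
      | cons mh mt =>
        cases hi : inside with
        | true => cases mt <;> simp [chunkScan]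
        | false =>
          by_cases hs : spec c = true
          · simp [chunkScan, hs]
          · cases mt <;> simp [chunkScan, hs]

theorem parity_not (n : Nat) : decide ((n + 1) % 2 = 0) = !decide (n % 2 = 0) := by
  rcases Nat.mod_two_eq_zero_or_one n with h | h
  · have h1 : (n + 1) % 2 = 1 := by omega
    simp [h, h1]
  · have h1 : (n + 1) % 2 = 0 := by omega
    simp [h, h1]

theorem parity_cons {α : Type} (x : α) (l : List α) :
    decide ((x :: l).length % 2 = 0) = !decide (l.length % 2 = 0) := by
  rw [List.length_cons]; exact parity_not l.length

theorem chunkScan_cons_cons (inside : Bool) (ch r2 : List Char) (rt : List (List Char)) :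
    chunkScan inside (ch :: r2 :: rt) =
      if !inside && ch.any spec then false else chunkScan (!inside) (r2 :: rt) := rfl

theorem chunkScan_eq (chunks : List (List Char)) : ∀ inside, chunks ≠ [] →
    chunkScan inside chunks =
      ((eo (!inside) chunks).all (fun ch => !ch.any spec) && (inside == decide (chunks.length % 2 = 0))) := by
  induction chunks with
  | nil => intro inside h; exact absurd rfl h
  | cons ch rest ih =>
    intro inside _
    cases rest with
    | nil =>
      cases inside <;> cases hs : ch.any spec <;> simp [chunkScan, eo, hs]
    | cons r2 rt =>
      have hr := ih (!inside) (by simp)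
      rw [chunkScan_cons_cons, hr]
      simp only [parity_cons]
      cases hi : inside with
      | false =>
        cases hs : ch.any spec
        · simp [eo, hs, -List.length_cons]
        · simp [eo, hs, -List.length_cons]
      | true =>
        simp [eo, -List.length_cons]

theorem main_eq (user : String) : check_quotes user = check_quotes_alt user := by
  unfold check_quotes check_quotes_alt
  have hcount : PySem.Str.count user "\"" = user.toList.count '"' := by
    rw [PySem.Str.count_eq]
    exact count_singleton '"' user.toList
  obtain ⟨parts, hp, hm⟩ : ∃ parts, PySem.Str.split? user "\"" = some parts ∧
      parts.map String.toList = mySplit user.toList := by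
    have h := PySem.Str.split?_map user "\""
    cases hs : PySem.Str.split? user "\"" with
    | none => rw [hs] at h; simp [PySem.Chars.split?] at h
    | some parts =>
      refine ⟨parts, rfl, ?_⟩
      rw [hs] at h
      simpa [PySem.Chars.split?, splitOn_eq] using h
  rw [bGo_eq, chunkScan_eq _ false (mySplit_ne_nil _)]
  rw [hcount, hp]
  simp only [Option.getD_some, Bool.not_false]
  by_cases h0 : user.toList.count '"' > 0
  · rw [if_pos h0]
    have hall : aLoop (eo true parts) =
        (eo true (mySplit user.toList)).all (fun l => !l.any spec) := by
      rw [aLoop_eq, ← hm, eo_map, List.all_map]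
      simp only [Function.comp_def, aAny_eq]
    by_cases h2 : user.toList.count '"' % 2 = 0
    · rw [if_pos (by simpa using h2)]
      rw [slice2_eq, Option.getD_some, hall]
      have hlen : decide ((mySplit user.toList).length % 2 = 0) = false := by
        rw [show (mySplit user.toList).length = user.toList.count '"' + 1 from length_mySplit _]
        simp
        omega
      rw [hlen]
      simp
    · rw [if_neg (by simpa using h2)]
      have hlen : decide ((mySplit user.toList).length % 2 = 0) = true := by
        rw [show (mySplit user.toList).length = user.toList.count '"' + 1 from length_mySplit _]
        simp
        omega
      rw [hlen]
      simp
  · rw [if_neg h0]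
    have hz : user.toList.count '"' = 0 := by omega
    rw [mySplit_no_quote _ hz]
    rw [aAny_eq]
    cases hs : user.toList.any spec <;> simp [eo, hs]

-- ===== VERDICT (by name: the statement is the Claim_ definition above) =====
theorem check_quotes_spec : Claim_equal_check_quotes := by
  intro user _
  unfold Spec_check_quotes
  exact main_eq user
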